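-- pv_equiv track=rewrite | github.com/tibetduman/AI | proj2/multiagent/multiAgents.py | allPossibleMoveCombinations
-- ===== SOURCE A (Python) =====
-- def allPossibleMoveCombinations(allMoves):
--     if not allMoves:
--         return []
--     answer = []
--     firstGhostMoves = allMoves[0]
--     for move in firstGhostMoves:
--         instance = [move]
--         for rest in allPossibleMoveCombinations(allMoves[1:]):
--             whole = instance + rest
--             answer.append(whole)
--         if not allPossibleMoveCombinations(allMoves[1:]):
--             answer.append(instance)
--     return answer
-- ===== SOURCE B (Python) =====
-- def allPossibleMoveCombinations(allMoves):
--     acc = []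
--     for moves in reversed(allMoves):
--         if acc:
--             acc = [[m] + c for m in moves for c in acc]
--         else:
--             acc = [[m] for m in moves]
--     return acc
-- ===== Notes on version B (the rewrite author's own statement) =====
-- stated objective: simpler
-- what changed: Replaced the recursion that recomputes the tail's product twice per outer move with a single right-to-left iterative fold building the product once.
import Mathlib
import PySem

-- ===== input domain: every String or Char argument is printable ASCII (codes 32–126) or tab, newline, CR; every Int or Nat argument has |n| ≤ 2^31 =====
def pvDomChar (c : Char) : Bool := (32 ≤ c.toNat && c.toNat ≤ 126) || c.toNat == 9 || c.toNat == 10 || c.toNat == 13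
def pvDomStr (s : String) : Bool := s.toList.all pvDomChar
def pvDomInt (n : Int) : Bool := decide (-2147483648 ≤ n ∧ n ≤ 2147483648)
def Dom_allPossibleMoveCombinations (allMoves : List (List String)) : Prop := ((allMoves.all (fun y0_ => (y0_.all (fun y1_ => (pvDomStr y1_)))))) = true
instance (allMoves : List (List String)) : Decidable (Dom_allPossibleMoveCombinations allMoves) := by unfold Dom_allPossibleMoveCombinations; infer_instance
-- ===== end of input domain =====

-- ===== PORT A =====
-- B folds right-to-left once, computing each suffix product a single time, instead of A's repeated recursion.
def allPossibleMoveCombinations : List (List String) → List (List String)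
  | [] => []
  | firstGhostMoves :: tail =>
    firstGhostMoves.foldl (fun answer move =>
      let answer := (allPossibleMoveCombinations tail).foldl
        (fun ans rest => ans ++ [move :: rest]) answer
      if allPossibleMoveCombinations tail = [] then answer ++ [[move]] else answer) []

-- ===== PORT B =====
def allPossibleMoveCombinations_alt (allMoves : List (List String)) : List (List String) :=
  allMoves.foldr (fun moves acc =>
    if acc ≠ [] then moves.flatMap (fun m => acc.map (fun c => m :: c))
    else moves.map (fun m => [m])) []

-- ===== PRECONDITION & SPEC =====
def Spec_allPossibleMoveCombinations (allMoves : List (List String)) (out : List (List String)) : Prop := out = allPossibleMoveCombinations_alt allMoves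
instance (allMoves : List (List String)) (out : List (List String)) : Decidable (Spec_allPossibleMoveCombinations allMoves out) := by unfold Spec_allPossibleMoveCombinations; infer_instance

-- ===== CLAIM (what is proved, stated in full; the proofs are below) =====
def Claim_equal_allPossibleMoveCombinations : Prop := ∀ (allMoves : List (List String)), Dom_allPossibleMoveCombinations allMoves → Spec_allPossibleMoveCombinations allMoves (allPossibleMoveCombinations allMoves)

-- ===== LEMMAS AND PROOFS =====

-- ===== VERDICT (by name: the statement is the Claim_ definition above) =====
theorem pv_main (allMoves : List (List String)) :
    allPossibleMoveCombinations allMoves = allPossibleMoveCombinations_alt allMoves := by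
  induction allMoves with
  | nil => rfl
  | cons x tail ih =>
    rw [allPossibleMoveCombinations, allPossibleMoveCombinations_alt, List.foldr_cons,
      ← allPossibleMoveCombinations_alt, ← ih]
    by_cases h : allPossibleMoveCombinations tail = []
    · simp only [h, List.foldl_nil, ne_eq, not_true_eq_false, if_false]
      induction x with
      | nil => rfl
      | cons y ys ihy => simp [List.foldl_cons] at ihy ⊢
                         simpa using ihy
    · simp only [h, if_false, ne_eq, not_false_eq_true, if_true]
      rw [show (fun (answer : List (List String)) move =>
          (allPossibleMoveCombinations tail).foldl (fun ans rest => ans ++ [move :: rest]) answer)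
        = (fun answer move => answer ++ ((allPossibleMoveCombinations tail).map (move :: ·)))
        from funext fun a => funext fun m =>
          PySem.List.foldl_append_singleton_eq_map (fun rest => m :: rest) _ _,
        PySem.List.foldl_append_eq_flatMap]
      simp

theorem allPossibleMoveCombinations_spec : Claim_equal_allPossibleMoveCombinations := by
  intro allMoves _
  unfold Spec_allPossibleMoveCombinations
  exact pv_main allMoves
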